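-- pv_equiv track=rewrite | github.com/Kiwirish/Anagrams | anagrams2.py | FindBestAnagrams
-- ===== SOURCE A (Python) =====
-- from collections import Counter, defaultdict
-- import itertools
--
-- def CleanUp(word):
--     return ''.join(filter(str.isalpha, word.lower()))
--
-- def CharCount(word):
--     return Counter(word)
--
-- def CompareWords(word1,word2):
--
--     for word1,word2 in itertools.zip_longest(word1,word2,fillvalue=""):
--
--         if len(word1) != len(word2):
--             return len(word2) - len(word1)
--         if word1 != word2:
--             return (word1 > word2) - (word1 < word2)
--     return 0
--
-- def FindAnagram(goalCharCount, availableWords):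
--
--     store = {}
--
--     def search(count):
--         # base case for recursion
--         if sum(count.values()) == 0:
--             return []
--
--         if tuple(count.items()) in store:
--             return store[tuple(count.items())]
--
--         bestAnagram = None
--
--         for word, wordCount in availableWords:
--
--             if all(count[char] >= wordCount[char] for char in wordCount):
--                 remainingCount = count - wordCount
--                 # recursively search with new remaining char count
--                 result = search(remainingCount)
--                 if result is not None:
--
--                     possibleBest = [word] + result
--
--                     # if current candidate is 'better' than best, make it best
--                     if bestAnagram is None or CompareWords(possibleBest, bestAnagram) < 0:
--                         bestAnagram = possibleBest
--
--         store[tuple(count.items())] = bestAnagram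
--
--         return bestAnagram
--     # just calls search when FindAnagram called as need to store outside of function
--     return search(goalCharCount)
--
-- def FindBestAnagrams(words, dictionaryWords):
--
--     # process dictionary and sort by length and alphabetical order
--     dictWordsProcessed = [(word, CharCount(word)) for word in map(CleanUp, dictionaryWords) if word]
--     dictWordsProcessed.sort(key=lambda x: (-len(x[0]), x[0]))
--
--     # process words (in first input block) and find anagrams calling FindAnagram on each word
--     results = []
--
--     for word in words:
--
--         cleanedUpWord = CleanUp(word)
--         wordCount = CharCount(cleanedUpWord)
--         anagram = FindAnagram(wordCount, dictWordsProcessed)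
--         result = f"{word}: {' '.join(anagram)}" if anagram else f"{word}:"
--         results.append(result)
--     return results
-- ===== SOURCE B (Python) =====
-- from collections import Counter
--
-- def CleanUp(word):
--     return ''.join(filter(str.isalpha, word.lower()))
--
-- def FindAnagram(goalCharCount, availableWords):
--     # availableWords is sorted by (-len(word), word), i.e. ascending in the
--     # "better word" order, so the best decomposition can be built GREEDILY:
--     # repeatedly take the first applicable word whose remainder is still
--     # decomposable.  Decomposability is a memoized boolean.
--     memo = {}
--     def decomposable(count):
--         if sum(count.values()) == 0:
--             return True
--         key = tuple(count.items())
--         if key in memo: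
--             return memo[key]
--         ok = any(all(count[c] >= wc[c] for c in wc) and decomposable(count - wc)
--                  for w, wc in availableWords)
--         memo[key] = ok
--         return ok
--
--     if not decomposable(goalCharCount):
--         return None
--     result = []
--     count = goalCharCount
--     while sum(count.values()) > 0:
--         for w, wc in availableWords:
--             if all(count[c] >= wc[c] for c in wc) and decomposable(count - wc):
--                 result.append(w)
--                 count = count - wc
--                 break
--     return result
--
-- def FindBestAnagrams(words, dictionaryWords):
--     dictWordsProcessed = [(w, Counter(w)) for w in map(CleanUp, dictionaryWords) if w]
--     dictWordsProcessed.sort(key=lambda x: (-len(x[0]), x[0]))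
--     results = []
--     for word in words:
--         anagram = FindAnagram(Counter(CleanUp(word)), dictWordsProcessed)
--         results.append(f"{word}: {' '.join(anagram)}" if anagram else f"{word}:")
--     return results
-- ===== Notes on version B (the rewrite author's own statement) =====
-- stated objective: faster
-- what changed: FindAnagram's memoized search that builds a best candidate list per state and compares whole word-lists with CompareWords is replaced by a memoized boolean decomposability test plus a greedy construction: since the processed dictionary is sorted by (-len(word), word) - exactly the CompareWords order - the best anagram is obtained by repeatedly taking the first applicable word whose remainder is still decomposable, so no candidate lists are built or compared.
import Mathlib
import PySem

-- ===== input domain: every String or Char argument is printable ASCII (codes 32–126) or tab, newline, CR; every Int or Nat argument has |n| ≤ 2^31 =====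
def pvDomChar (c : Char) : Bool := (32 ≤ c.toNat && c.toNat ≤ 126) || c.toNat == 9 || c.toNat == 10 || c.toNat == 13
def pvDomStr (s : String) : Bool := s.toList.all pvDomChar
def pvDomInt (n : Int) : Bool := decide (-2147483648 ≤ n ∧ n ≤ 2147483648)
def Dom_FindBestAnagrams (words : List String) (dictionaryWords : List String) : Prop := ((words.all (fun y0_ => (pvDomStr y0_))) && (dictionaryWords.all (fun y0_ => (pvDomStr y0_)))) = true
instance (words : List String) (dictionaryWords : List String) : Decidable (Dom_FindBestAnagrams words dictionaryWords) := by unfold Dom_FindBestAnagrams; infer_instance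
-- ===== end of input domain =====

-- B replaces A's memoized best-list search by a memoized boolean reachability test plus a
-- greedy construction that exploits the sortedness of the processed dictionary (objective: faster).

-- ===== PORT A =====
-- helpers shared by both ports (the same Python source lines appear verbatim in Source A and Source B)
abbrev Cnt := PySem.Dict Char Int

-- CleanUp: ''.join(filter(str.isalpha, word.lower()))
def cleanUp (word : String) : String :=
  String.ofList ((PySem.Str.lower word).toList.filter PySem.Chars.isalpha)

-- CharCount: Counter(word)
def charCount (word : String) : Cnt := PySem.Dict.counter word.toList

-- sum(count.values())
def sumv (c : Cnt) : Int := c.values.sum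

-- all(count[char] >= wordCount[char] for char in wordCount)
def fits (c wc : Cnt) : Bool := wc.keys.all (fun ch => decide (wc.getD ch 0 ≤ c.getD ch 0))

-- Counter subtraction `count - wordCount` (keeps only positive results, in count's key order,
-- then negative counts of keys only in wordCount; exact port of collections.Counter.__sub__)
def csub (c wc : Cnt) : Cnt :=
  PySem.Dict.mk
    ((c.items.filterMap (fun p =>
        if 0 < p.2 - wc.getD p.1 0 then some (p.1, p.2 - wc.getD p.1 0) else none)) ++
     (wc.items.filterMap (fun p =>
        if !(c.contains p.1) && decide (p.2 < 0) then some (p.1, -p.2) else none)))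

-- the common dictionary preprocessing: [(w, Counter(w)) for w in map(CleanUp, dws) if w],
-- sorted by key (-len(w), w)
def processDict (dictionaryWords : List String) : List (String × Cnt) :=
  PySem.List.sorted2
    (((dictionaryWords.map cleanUp).filter (fun w => !(w == ""))).map (fun w => (w, charCount w)))
    (fun p => -(PySem.Str.len p.1)) (fun p => p.1)

-- CompareWords on lists of words (zip_longest with fillvalue "")
def cmpL : List String → List String → Int
  | [], [] => 0
  | a :: x, [] =>
    if PySem.Str.len a ≠ PySem.Str.len "" then PySem.Str.len "" - PySem.Str.len a
    else if a ≠ "" then (if ("" : String) < a then 1 else -1) else cmpL x []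
  | [], b :: y =>
    if PySem.Str.len "" ≠ PySem.Str.len b then PySem.Str.len b - PySem.Str.len ""
    else if ("" : String) ≠ b then (if b < "" then 1 else -1) else cmpL [] y
  | a :: x, b :: y =>
    if PySem.Str.len a ≠ PySem.Str.len b then PySem.Str.len b - PySem.Str.len a
    else if a ≠ b then (if b < a then 1 else -1) else cmpL x y
termination_by l1 l2 => l1.length + l2.length

abbrev StoreA := PySem.Dict (List (Char × Int)) (Option (List String))

-- body of the `for word, wordCount in availableWords` loop of `search`
def stepA (recf : Cnt → StoreA → Option (List String) × StoreA) (c : Cnt)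
    (acc : Option (List String) × StoreA) (p : String × Cnt) :
    Option (List String) × StoreA :=
  if fits c p.2 then
    let res := recf (csub c p.2) acc.2
    match res.1 with
    | some rl =>
      match acc.1 with
      | none => (some (p.1 :: rl), res.2)
      | some b => if cmpL (p.1 :: rl) b < 0 then (some (p.1 :: rl), res.2) else (acc.1, res.2)
    | none => (acc.1, res.2)
  else acc

-- the recursive `search` with its memo `store`, fuel = recursion depth (sums strictly decrease)
def searchA (aw : List (String × Cnt)) : Nat → Cnt → StoreA → Option (List String) × StoreA
  | 0, _, st => (none, st)
  | f+1, c, st =>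
    if sumv c = 0 then (some [], st) else
    match st.get? c.items with
    | some v => (v, st)
    | none =>
      let r := aw.foldl (stepA (searchA aw f) c) ((none : Option (List String)), st)
      (r.1, r.2.insert c.items r.1)

def findAnagramA (goal : Cnt) (aw : List (String × Cnt)) : Option (List String) :=
  (searchA aw ((sumv goal).toNat + 1) goal PySem.Dict.empty).1

def FindBestAnagrams (words : List String) (dictionaryWords : List String) : List String :=
  let dictWordsProcessed := processDict dictionaryWords
  words.foldl (fun results word =>
    let cleanedUpWord := cleanUp word
    let wordCount := charCount cleanedUpWord
    let anagram := findAnagramA wordCount dictWordsProcessed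
    results ++ [match anagram with
      | some (x :: xs) => word ++ ": " ++ PySem.Str.join " " (x :: xs)
      | _ => word ++ ":"]) []

-- ===== PORT B =====
abbrev StoreB := PySem.Dict (List (Char × Int)) Bool

-- any(... for w, wc in availableWords) with short-circuit, threading the memo
def anyDec (recf : Cnt → StoreB → Bool × StoreB) (c : Cnt) :
    List (String × Cnt) → StoreB → Bool × StoreB
  | [], st => (false, st)
  | p :: rest, st =>
    if fits c p.2 then
      let res := recf (csub c p.2) st
      if res.1 then (true, res.2) else anyDec recf c rest res.2
    else anyDec recf c rest st

-- memoized `decomposable`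
def decB (aw : List (String × Cnt)) : Nat → Cnt → StoreB → Bool × StoreB
  | 0, _, st => (false, st)
  | f+1, c, st =>
    if sumv c = 0 then (true, st) else
    match st.get? c.items with
    | some v => (v, st)
    | none =>
      let r := anyDec (decB aw f) c aw st
      (r.1, r.2.insert c.items r.1)

-- the for-loop of the greedy while-body: first word that fits with decomposable remainder
def findDec (recf : Cnt → StoreB → Bool × StoreB) (c : Cnt) :
    List (String × Cnt) → StoreB → Option (String × Cnt) × StoreB
  | [], st => (none, st)
  | p :: rest, st =>
    if fits c p.2 then
      let res := recf (csub c p.2) st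
      if res.1 then (some p, res.2) else findDec recf c rest res.2
    else findDec recf c rest st

-- the greedy while-loop (fuel bounds the number of iterations)
def greedyB (aw : List (String × Cnt)) : Nat → Cnt → StoreB → List String → List String
  | 0, _, _, acc => acc
  | f+1, c, st, acc =>
    if 0 < sumv c then
      let r := findDec (decB aw ((sumv c).toNat + 1)) c aw st
      match r.1 with
      | some p => greedyB aw f (csub c p.2) r.2 (acc ++ [p.1])
      | none => acc
    else acc

def findAnagramB (goal : Cnt) (aw : List (String × Cnt)) : Option (List String) :=
  let d := decB aw ((sumv goal).toNat + 1) goal PySem.Dict.empty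
  if d.1 then some (greedyB aw ((sumv goal).toNat + 1) goal d.2 []) else none

def FindBestAnagrams_alt (words : List String) (dictionaryWords : List String) : List String :=
  let dictWordsProcessed := processDict dictionaryWords
  words.foldl (fun results word =>
    let anagram := findAnagramB (charCount (cleanUp word)) dictWordsProcessed
    results ++ [match anagram with
      | none => word ++ ":"
      | some [] => word ++ ":"
      | some (x :: xs) => word ++ ": " ++ PySem.Str.join " " (x :: xs)]) []

-- ===== PRECONDITION & SPEC =====
def Spec_FindBestAnagrams (words : List String) (dictionaryWords : List String) (out : List String) : Prop := out = FindBestAnagrams_alt words dictionaryWords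
instance (words : List String) (dictionaryWords : List String) (out : List String) : Decidable (Spec_FindBestAnagrams words dictionaryWords out) := by unfold Spec_FindBestAnagrams; infer_instance

-- ===== CLAIM (what is proved, stated in full; the proofs are below) =====
def Claim_equal_FindBestAnagrams : Prop := ∀ (words : List String) (dictionaryWords : List String), Dom_FindBestAnagrams words dictionaryWords → Spec_FindBestAnagrams words dictionaryWords (FindBestAnagrams words dictionaryWords)

-- ===== LEMMAS AND PROOFS =====

-- a positive counter: all stored values positive, keys unique
def PosC (c : Cnt) : Prop := (∀ p ∈ c.items, 0 < p.2) ∧ c.keys.Nodup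

-- pure (memo-free) reference versions of A's search, of decomposability, and of the greedy walk
def stepP (recb : Cnt → Option (List String)) (c : Cnt)
    (acc : Option (List String)) (p : String × Cnt) : Option (List String) :=
  if fits c p.2 then
    match recb (csub c p.2) with
    | some rl =>
      match acc with
      | none => some (p.1 :: rl)
      | some b => if cmpL (p.1 :: rl) b < 0 then some (p.1 :: rl) else acc
    | none => acc
  else acc

def bestP (aw : List (String × Cnt)) : Nat → Cnt → Option (List String)
  | 0, _ => none
  | f+1, c => if sumv c = 0 then some [] else aw.foldl (stepP (bestP aw f) c) none

def okP (aw : List (String × Cnt)) : Nat → Cnt → Bool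
  | 0, _ => false
  | f+1, c => if sumv c = 0 then true
              else aw.any (fun p => fits c p.2 && okP aw f (csub c p.2))

def gP (aw : List (String × Cnt)) : Nat → Cnt → List String
  | 0, _ => []
  | f+1, c =>
    if 0 < sumv c then
      match aw.find? (fun p => fits c p.2 && okP aw f (csub c p.2)) with
      | some p => p.1 :: gP aw f (csub c p.2)
      | none => []
    else []

def Haw (aw : List (String × Cnt)) : Prop := ∀ p ∈ aw, PosC p.2 ∧ p.2.items ≠ []

def beforeB (p q : String × Cnt) : Bool :=
  decide (-(PySem.Str.len p.1) < -(PySem.Str.len q.1)) ||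
  (!decide (-(PySem.Str.len q.1) < -(PySem.Str.len p.1)) && decide (p.1 < q.1))

-- one-step unfolding equations (rfl) used to unfold exactly one fuel layer
theorem bestP_succ (aw : List (String × Cnt)) (f : Nat) (c : Cnt) :
    bestP aw (f+1) c = if sumv c = 0 then some [] else aw.foldl (stepP (bestP aw f) c) none := rfl

theorem okP_succ (aw : List (String × Cnt)) (f : Nat) (c : Cnt) :
    okP aw (f+1) c = if sumv c = 0 then true
      else aw.any (fun p => fits c p.2 && okP aw f (csub c p.2)) := rfl

-- ~~~ counting lemmas ~~~
theorem sumv_nonneg (c : Cnt) (hc : PosC c) : 0 ≤ sumv c := by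
  apply List.sum_nonneg
  intro x hx
  simp only [sumv, PySem.Dict.values, List.mem_map] at hx
  obtain ⟨p, hp, rfl⟩ := hx
  exact le_of_lt (hc.1 p hp)


theorem posC_charCount (w : String) : PosC (charCount w) := by
  constructor
  · intro p hp
    rw [charCount, PySem.Dict.items_counter] at hp
    obtain ⟨k, hk, rfl⟩ := List.mem_map.mp hp
    rw [PySem.Set.mem_ofList] at hk
    simpa using List.count_pos_iff.mpr hk
  · exact PySem.Dict.nodup_keys_counter _


theorem charCount_items_ne_nil (w : String) (hw : w ≠ "") : (charCount w).items ≠ [] := by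
  rw [charCount, PySem.Dict.items_counter]
  have htl : w.toList ≠ [] := by
    intro h
    apply hw
    have h2 : String.ofList w.toList = w := String.ofList_toList
    rw [h] at h2
    exact h2.symm
  obtain ⟨x, xs, hx⟩ := List.exists_cons_of_ne_nil htl
  have : x ∈ PySem.Set.ofList w.toList := (PySem.Set.mem_ofList _ _).mpr (by simp [hx])
  intro h
  rw [List.map_eq_nil_iff] at h
  simp [h] at this


theorem getD_pos_of_mem_keys (d : Cnt) (hd : PosC d) (k : Char) (hk : k ∈ d.keys) :
    0 < d.getD k 0 := by
  simp only [PySem.Dict.keys, List.mem_map] at hk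
  obtain ⟨p, hp, rfl⟩ := hk
  rw [PySem.Dict.getD_of_mem_items d (by simpa using hp) hd.2]
  exact hd.1 p hp

theorem getD_nonneg (d : Cnt) (hd : PosC d) (k : Char) : 0 ≤ d.getD k 0 := by
  by_cases hco : d.contains k = true
  · exact le_of_lt (getD_pos_of_mem_keys d hd k ((PySem.Dict.contains_iff_mem_keys d k).mp hco))
  · rw [PySem.Dict.getD_of_not_contains d 0 (by simpa using hco)]

theorem contains_of_getD_pos (d : Cnt) (k : Char) (h : 0 < d.getD k 0) : d.contains k = true := by
  by_contra hco
  rw [PySem.Dict.getD_of_not_contains d 0 (by simpa using hco)] at h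
  omega

theorem fits_le (c wc : Cnt) (hc : PosC c) (hwc : PosC wc) (hf : fits c wc = true) (k : Char) :
    wc.getD k 0 ≤ c.getD k 0 := by
  by_cases hk : k ∈ wc.keys
  · have := List.all_eq_true.mp hf k hk
    simpa using this
  · rw [PySem.Dict.getD_of_not_contains wc 0]
    · exact getD_nonneg c hc k
    · by_contra hco
      exact hk ((PySem.Dict.contains_iff_mem_keys wc k).mp (by simpa using hco))

theorem csub_items (c wc : Cnt) (hwc : ∀ p ∈ wc.items, 0 < p.2) :
    (csub c wc).items = c.items.filterMap (fun p =>
        if 0 < p.2 - wc.getD p.1 0 then some (p.1, p.2 - wc.getD p.1 0) else none) := by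
  have h2 : wc.items.filterMap (fun p =>
      if !(c.contains p.1) && decide (p.2 < 0) then some (p.1, -p.2) else none) = [] := by
    apply List.filterMap_eq_nil_iff.mpr
    intro p hp
    have := hwc p hp
    simp [show ¬(p.2 < 0) by omega]
  show _ ++ _ = _
  rw [h2, List.append_nil]

theorem sum_filterMap_vals (l : List (Char × Int)) (d : Cnt) :
    ((l.filterMap (fun p =>
        if 0 < p.2 - d.getD p.1 0 then some (p.1, p.2 - d.getD p.1 0) else none)).map (·.2)).sum
      = (l.map (fun p => if 0 < p.2 - d.getD p.1 0 then p.2 - d.getD p.1 0 else 0)).sum := by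
  induction l with
  | nil => simp
  | cons q t ih =>
    simp only [List.filterMap_cons, List.map_cons, List.sum_cons, Int.sub_pos]
    simp only [Int.sub_pos] at ih
    by_cases hcond : d.getD q.1 0 < q.2
    · simp [hcond, ih]
    · simp [hcond, ih]

theorem sumv_csub_eq (c wc : Cnt) (hc : PosC c) (hwc : PosC wc) (hf : fits c wc = true) :
    sumv (csub c wc) = sumv c - (c.items.map (fun p => wc.getD p.1 0)).sum := by
  show ((csub c wc).items.map (·.2)).sum = (c.items.map (·.2)).sum - _
  rw [csub_items c wc hwc.1, sum_filterMap_vals]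
  have hpt : ∀ p ∈ c.items, (if 0 < p.2 - wc.getD p.1 0 then p.2 - wc.getD p.1 0 else 0)
      = p.2 - wc.getD p.1 0 := by
    intro p hp
    have h1 : c.getD p.1 0 = p.2 := PySem.Dict.getD_of_mem_items c (by simpa using hp) hc.2 0
    have h2 := fits_le c wc hc hwc hf p.1
    split <;> omega
  rw [List.map_congr_left hpt]
  induction c.items with
  | nil => simp
  | cons q t ih => simp [ih]; ring

theorem posC_csub (c wc : Cnt) (hc : PosC c) (hwc : PosC wc) : PosC (csub c wc) := by
  have hitems := csub_items c wc hwc.1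
  constructor
  · intro p hp
    rw [hitems] at hp
    obtain ⟨q, hq, hqe⟩ := List.mem_filterMap.mp hp
    split at hqe
    · cases hqe; assumption
    · cases hqe
  · show ((csub c wc).items.map (·.1)).Nodup
    rw [hitems]
    have hgen : ∀ l : List (Char × Int),
        ((l.filterMap (fun p => if 0 < p.2 - wc.getD p.1 0
            then some (p.1, p.2 - wc.getD p.1 0) else none)).map (·.1)).Sublist
          (l.map (·.1)) := by
      intro l
      induction l with
      | nil => simp
      | cons q t ih =>
        simp only [List.filterMap_cons, Int.sub_pos]
        by_cases hcond : wc.getD q.1 0 < q.2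
        · simpa [hcond] using ih.cons₂ q.1
        · simpa [hcond] using ih.cons q.1
    have hk : c.keys = c.items.map (·.1) := rfl
    exact List.Nodup.sublist (hgen c.items) (hk ▸ hc.2)


theorem sumv_csub_lt (c wc : Cnt) (hc : PosC c) (hwc : PosC wc) (hf : fits c wc = true)
    (hne : wc.items ≠ []) : sumv (csub c wc) < sumv c := by
  rw [sumv_csub_eq c wc hc hwc hf]
  have hS : 0 < (c.items.map (fun p => wc.getD p.1 0)).sum := by
    obtain ⟨q, tq, hq⟩ := List.exists_cons_of_ne_nil hne
    have hqmem : q ∈ wc.items := by rw [hq]; exact List.mem_cons_self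
    have hqk : q.1 ∈ wc.keys := PySem.Dict.mem_keys_of_mem_items wc hqmem
    have hqpos : 0 < wc.getD q.1 0 := getD_pos_of_mem_keys wc hwc q.1 hqk
    have hcpos : 0 < c.getD q.1 0 := lt_of_lt_of_le hqpos (fits_le c wc hc hwc hf q.1)
    have hck : q.1 ∈ c.keys := (PySem.Dict.contains_iff_mem_keys c q.1).mp
      (contains_of_getD_pos c q.1 hcpos)
    simp only [PySem.Dict.keys, List.mem_map] at hck
    obtain ⟨p, hp, hpk⟩ := hck
    have hterm : wc.getD p.1 0 ∈ c.items.map (fun p => wc.getD p.1 0) :=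
      List.mem_map.mpr ⟨p, hp, rfl⟩
    have : 0 < wc.getD p.1 0 := by rw [hpk]; exact hqpos
    calc (0:Int) < wc.getD p.1 0 := this
      _ ≤ _ := List.single_le_sum (fun x hx => by
          obtain ⟨r, hr, rfl⟩ := List.mem_map.mp hx
          exact getD_nonneg wc hwc r.1) _ hterm
  omega


-- ~~~ fuel stability ~~~
theorem bestP_stable (aw : List (String × Cnt)) (haw : Haw aw) (f : Nat) :
    ∀ (g : Nat) (c : Cnt), PosC c → sumv c ≤ (f : Int) → sumv c ≤ (g : Int) →
    bestP aw (f+1) c = bestP aw (g+1) c := by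
  induction f using Nat.strong_induction_on with
  | _ f ih =>
    intro g c hc hf hg
    by_cases h0 : sumv c = 0
    · rw [bestP_succ, bestP_succ, if_pos h0, if_pos h0]
    · have h1 : 1 ≤ sumv c := by have := sumv_nonneg c hc; omega
      obtain ⟨f', rfl⟩ : ∃ f', f = f' + 1 := by
        cases f with
        | zero => exfalso; simp at hf; omega
        | succ n => exact ⟨n, rfl⟩
      obtain ⟨g', rfl⟩ : ∃ g', g = g' + 1 := by
        cases g with
        | zero => exfalso; simp at hg; omega
        | succ n => exact ⟨n, rfl⟩
      rw [bestP_succ, bestP_succ, if_neg h0, if_neg h0]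
      apply PySem.List.foldl_congr_mem
      intro acc p hp
      unfold stepP
      by_cases hfit : fits c p.2 = true
      · have hpw := haw p hp
        have hpos := posC_csub c p.2 hc hpw.1
        have hlt := sumv_csub_lt c p.2 hc hpw.1 hfit hpw.2
        have heq : bestP aw (f'+1) (csub c p.2) = bestP aw (g'+1) (csub c p.2) :=
          ih f' (by omega) g' (csub c p.2) hpos (by push_cast at hf ⊢; omega)
            (by push_cast at hg ⊢; omega)
        rw [if_pos hfit, if_pos hfit, heq]
      · rw [if_neg hfit, if_neg hfit]

theorem okP_stable (aw : List (String × Cnt)) (haw : Haw aw) (f : Nat) :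
    ∀ (g : Nat) (c : Cnt), PosC c → sumv c ≤ (f : Int) → sumv c ≤ (g : Int) →
    okP aw (f+1) c = okP aw (g+1) c := by
  induction f using Nat.strong_induction_on with
  | _ f ih =>
    intro g c hc hf hg
    by_cases h0 : sumv c = 0
    · rw [okP_succ, okP_succ, if_pos h0, if_pos h0]
    · have h1 : 1 ≤ sumv c := by have := sumv_nonneg c hc; omega
      obtain ⟨f', rfl⟩ : ∃ f', f = f' + 1 := by
        cases f with
        | zero => exfalso; simp at hf; omega
        | succ n => exact ⟨n, rfl⟩
      obtain ⟨g', rfl⟩ : ∃ g', g = g' + 1 := by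
        cases g with
        | zero => exfalso; simp at hg; omega
        | succ n => exact ⟨n, rfl⟩
      rw [okP_succ, okP_succ, if_neg h0, if_neg h0]
      apply PySem.List.any_congr_mem
      intro p hp
      by_cases hfit : fits c p.2 = true
      · have hpw := haw p hp
        have hpos := posC_csub c p.2 hc hpw.1
        have hlt := sumv_csub_lt c p.2 hc hpw.1 hfit hpw.2
        have heq : okP aw (f'+1) (csub c p.2) = okP aw (g'+1) (csub c p.2) :=
          ih f' (by omega) g' (csub c p.2) hpos (by push_cast at hf ⊢; omega)
            (by push_cast at hg ⊢; omega)
        rw [heq]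
      · simp [hfit]

-- ~~~ okP decides whether bestP finds something ~~~
theorem stepP_isSome (recb : Cnt → Option (List String)) (c : Cnt)
    (acc : Option (List String)) (p : String × Cnt) :
    (stepP recb c acc p).isSome = (acc.isSome || (fits c p.2 && (recb (csub c p.2)).isSome)) := by
  unfold stepP
  by_cases hfit : fits c p.2 = true
  · rcases hbb : recb (csub c p.2) with _ | rl
    · cases acc <;> simp [hfit, hbb]
    · cases acc <;> simp [hfit, hbb]
      split <;> simp
  · simp [hfit]

theorem foldP_isSome (recb : Cnt → Option (List String)) (c : Cnt) :
    ∀ (l : List (String × Cnt)) (acc : Option (List String)),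
    (l.foldl (stepP recb c) acc).isSome
      = (acc.isSome || l.any (fun p => fits c p.2 && (recb (csub c p.2)).isSome)) := by
  intro l
  induction l with
  | nil => simp
  | cons p t iht =>
    intro acc
    simp only [List.foldl_cons, List.any_cons]
    rw [iht, stepP_isSome]
    cases acc <;> simp

theorem okP_eq_isSome (aw : List (String × Cnt)) (haw : Haw aw) (f : Nat) :
    ∀ (c : Cnt), PosC c → sumv c ≤ (f : Int) →
    okP aw (f+1) c = (bestP aw (f+1) c).isSome := by
  induction f using Nat.strong_induction_on with
  | _ f ih =>
    intro c hc hf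
    by_cases h0 : sumv c = 0
    · rw [okP_succ, bestP_succ, if_pos h0, if_pos h0]; rfl
    · have h1 : 1 ≤ sumv c := by have := sumv_nonneg c hc; omega
      obtain ⟨f', rfl⟩ : ∃ f', f = f' + 1 := by
        cases f with
        | zero => exfalso; simp at hf; omega
        | succ n => exact ⟨n, rfl⟩
      rw [okP_succ, bestP_succ, if_neg h0, if_neg h0, foldP_isSome]
      simp only [Option.isSome_none, Bool.false_or]
      apply PySem.List.any_congr_mem
      intro p hp
      by_cases hfit : fits c p.2 = true
      · have hpw := haw p hp
        have hpos := posC_csub c p.2 hc hpw.1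
        have hlt := sumv_csub_lt c p.2 hc hpw.1 hfit hpw.2
        have heq : okP aw (f'+1) (csub c p.2) = (bestP aw (f'+1) (csub c p.2)).isSome :=
          ih f' (by omega) (csub c p.2) hpos (by push_cast at hf ⊢; omega)
        rw [heq]
      · simp [hfit]

-- ~~~ A's memo is coherent ~~~
def InvA (aw : List (String × Cnt)) (st : StoreA) : Prop :=
  ∀ k v, st.get? k = some v →
    PosC (PySem.Dict.mk k) ∧
    v = bestP aw ((sumv (PySem.Dict.mk k)).toNat + 1) (PySem.Dict.mk k)

theorem searchA_succ (aw : List (String × Cnt)) (f : Nat) (c : Cnt) (st : StoreA) :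
    searchA aw (f+1) c st =
      (if sumv c = 0 then (some [], st) else
       match st.get? c.items with
       | some v => (v, st)
       | none =>
         let r := aw.foldl (stepA (searchA aw f) c) ((none : Option (List String)), st)
         (r.1, r.2.insert c.items r.1)) := rfl

theorem invA_insert (aw : List (String × Cnt)) (st : StoreA) (hst : InvA aw st) (c : Cnt)
    (hc : PosC c) (v : Option (List String))
    (hv : v = bestP aw ((sumv c).toNat + 1) c) :
    InvA aw (st.insert c.items v) := by
  intro k w hkw
  rw [PySem.Dict.get?_insert] at hkw
  split at hkw
  · rename_i hke
    cases hkw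
    subst hke
    exact ⟨hc, hv⟩
  · exact hst k w hkw

theorem foldA_eq (aw : List (String × Cnt)) (haw : Haw aw) (f' : Nat) (c : Cnt) (hc : PosC c)
    (hb : sumv c ≤ (f' : Int) + 1)
    (hrec : ∀ (c' : Cnt) (st' : StoreA), PosC c' → sumv c' ≤ (f' : Int) → InvA aw st' →
      (searchA aw (f'+1) c' st').1 = bestP aw (f'+1) c' ∧ InvA aw (searchA aw (f'+1) c' st').2) :
    ∀ (l : List (String × Cnt)), (∀ p ∈ l, p ∈ aw) →
    ∀ (acc : Option (List String)) (st₁ : StoreA), InvA aw st₁ →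
    (List.foldl (stepA (searchA aw (f'+1)) c) (acc, st₁) l).1
        = List.foldl (stepP (bestP aw (f'+1)) c) acc l
    ∧ InvA aw (List.foldl (stepA (searchA aw (f'+1)) c) (acc, st₁) l).2 := by
  intro l
  induction l with
  | nil => intro _ acc st₁ h; exact ⟨rfl, h⟩
  | cons p t iht =>
    intro hmem acc st₁ hst₁
    have hpaw : p ∈ aw := hmem p List.mem_cons_self
    have htaw : ∀ q ∈ t, q ∈ aw := fun q hq => hmem q (List.mem_cons_of_mem _ hq)
    simp only [List.foldl_cons]
    by_cases hfit : fits c p.2 = true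
    · have hpw := haw p hpaw
      have hpos := posC_csub c p.2 hc hpw.1
      have hlt := sumv_csub_lt c p.2 hc hpw.1 hfit hpw.2
      have hrc := hrec (csub c p.2) st₁ hpos (by omega) hst₁
      have hpair : stepA (searchA aw (f'+1)) c (acc, st₁) p
          = (stepP (bestP aw (f'+1)) c acc p, (searchA aw (f'+1) (csub c p.2) st₁).2) := by
        simp only [stepA, stepP, if_pos hfit]
        rw [hrc.1]
        rcases bestP aw (f'+1) (csub c p.2) with _ | rl
        · rfl
        · cases acc
          · rfl
          · simp only []
            split <;> rfl
      rw [hpair]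
      exact iht htaw _ _ hrc.2
    · have hpair : stepA (searchA aw (f'+1)) c (acc, st₁) p = (acc, st₁) := by
        simp only [stepA, if_neg hfit]
      have hpure : stepP (bestP aw (f'+1)) c acc p = acc := by
        simp only [stepP, if_neg hfit]
      rw [hpair, hpure]
      exact iht htaw _ _ hst₁

theorem searchA_eq (aw : List (String × Cnt)) (haw : Haw aw) (f : Nat) :
    ∀ (c : Cnt) (st : StoreA), PosC c → sumv c ≤ (f : Int) → InvA aw st →
    (searchA aw (f+1) c st).1 = bestP aw (f+1) c ∧ InvA aw (searchA aw (f+1) c st).2 := by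
  induction f using Nat.strong_induction_on with
  | _ f ih =>
    intro c st hc hf hst
    rw [searchA_succ, bestP_succ]
    by_cases h0 : sumv c = 0
    · rw [if_pos h0, if_pos h0]
      exact ⟨rfl, hst⟩
    · rw [if_neg h0, if_neg h0]
      have h1 : 1 ≤ sumv c := by have := sumv_nonneg c hc; omega
      obtain ⟨f', rfl⟩ : ∃ f', f = f' + 1 := by
        cases f with
        | zero => exfalso; simp at hf; omega
        | succ n => exact ⟨n, rfl⟩
      cases hg : st.get? c.items with
      | some v =>
        have hv := hst c.items v hg
        constructor
        · show v = _
          rw [show v = bestP aw ((sumv c).toNat + 1) c from hv.2]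
          rw [show bestP aw ((sumv c).toNat + 1) c
                = bestP aw ((f'+1) + 1) c from
              bestP_stable aw haw ((sumv c).toNat) (f'+1) c hc
                (by omega) (by push_cast at hf ⊢; omega)]
          rw [bestP_succ, if_neg h0]
        · exact hst
      | none =>
        have hrec : ∀ (c' : Cnt) (st' : StoreA), PosC c' → sumv c' ≤ ((f' : Nat) : Int) →
            InvA aw st' → (searchA aw (f'+1) c' st').1 = bestP aw (f'+1) c'
              ∧ InvA aw (searchA aw (f'+1) c' st').2 := by
          intro c' st' hc' hf' hst'
          exact ih f' (by omega) c' st' hc' hf' hst'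
        have hfold := foldA_eq aw haw f' c hc (by push_cast at hf ⊢; omega) hrec aw
          (fun _ h => h) none st hst
        constructor
        · exact hfold.1
        · apply invA_insert aw _ hfold.2 c hc
          rw [hfold.1]
          rw [show List.foldl (stepP (bestP aw (f'+1)) c) none aw
                = bestP aw ((f'+1)+1) c from (by rw [bestP_succ, if_neg h0])]
          exact (bestP_stable aw haw (f'+1) ((sumv c).toNat) c hc
            (by push_cast at hf ⊢; omega) (by omega))

theorem invA_empty (aw : List (String × Cnt)) : InvA aw PySem.Dict.empty := by
  intro k v hkv
  rw [PySem.Dict.get?_empty] at hkv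
  cases hkv

theorem findAnagramA_eq (aw : List (String × Cnt)) (haw : Haw aw) (goal : Cnt) (hg : PosC goal) :
    findAnagramA goal aw = bestP aw ((sumv goal).toNat + 1) goal := by
  exact (searchA_eq aw haw ((sumv goal).toNat) goal PySem.Dict.empty hg
    (by have := sumv_nonneg goal hg; omega) (invA_empty aw)).1

-- ~~~ B's memo is coherent ~~~
def InvB (aw : List (String × Cnt)) (st : StoreB) : Prop :=
  ∀ k v, st.get? k = some v →
    PosC (PySem.Dict.mk k) ∧
    v = okP aw ((sumv (PySem.Dict.mk k)).toNat + 1) (PySem.Dict.mk k)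

theorem decB_succ (aw : List (String × Cnt)) (f : Nat) (c : Cnt) (st : StoreB) :
    decB aw (f+1) c st =
      (if sumv c = 0 then (true, st) else
       match st.get? c.items with
       | some v => (v, st)
       | none =>
         let r := anyDec (decB aw f) c aw st
         (r.1, r.2.insert c.items r.1)) := rfl

theorem anyDec_cons (recf : Cnt → StoreB → Bool × StoreB) (c : Cnt) (p : String × Cnt)
    (rest : List (String × Cnt)) (st : StoreB) :
    anyDec recf c (p :: rest) st =
      (if fits c p.2 then
        let res := recf (csub c p.2) st
        if res.1 then (true, res.2) else anyDec recf c rest res.2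
      else anyDec recf c rest st) := rfl

theorem invB_insert (aw : List (String × Cnt)) (st : StoreB) (hst : InvB aw st) (c : Cnt)
    (hc : PosC c) (v : Bool) (hv : v = okP aw ((sumv c).toNat + 1) c) :
    InvB aw (st.insert c.items v) := by
  intro k w hkw
  rw [PySem.Dict.get?_insert] at hkw
  split at hkw
  · rename_i hke
    cases hkw
    subst hke
    exact ⟨hc, hv⟩
  · exact hst k w hkw

theorem anyDec_eq (aw : List (String × Cnt)) (haw : Haw aw) (f' : Nat) (c : Cnt) (hc : PosC c)
    (hb : sumv c ≤ (f' : Int) + 1)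
    (hrec : ∀ (c' : Cnt) (st' : StoreB), PosC c' → sumv c' ≤ (f' : Int) → InvB aw st' →
      (decB aw (f'+1) c' st').1 = okP aw (f'+1) c' ∧ InvB aw (decB aw (f'+1) c' st').2) :
    ∀ (l : List (String × Cnt)), (∀ p ∈ l, p ∈ aw) →
    ∀ (st₁ : StoreB), InvB aw st₁ →
    (anyDec (decB aw (f'+1)) c l st₁).1
        = l.any (fun p => fits c p.2 && okP aw (f'+1) (csub c p.2))
    ∧ InvB aw (anyDec (decB aw (f'+1)) c l st₁).2 := by
  intro l
  induction l with
  | nil => intro _ st₁ h; exact ⟨rfl, h⟩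
  | cons p t iht =>
    intro hmem st₁ hst₁
    have hpaw : p ∈ aw := hmem p List.mem_cons_self
    have htaw : ∀ q ∈ t, q ∈ aw := fun q hq => hmem q (List.mem_cons_of_mem _ hq)
    simp only [List.any_cons]
    by_cases hfit : fits c p.2 = true
    · have hpw := haw p hpaw
      have hpos := posC_csub c p.2 hc hpw.1
      have hlt := sumv_csub_lt c p.2 hc hpw.1 hfit hpw.2
      have hrc := hrec (csub c p.2) st₁ hpos (by omega) hst₁
      rw [anyDec_cons, if_pos hfit]
      cases hok : okP aw (f'+1) (csub c p.2) with
      | true =>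
        have hd1 : (decB aw (f'+1) (csub c p.2) st₁).1 = true := by rw [hrc.1, hok]
        simp only [hd1]
        exact ⟨by simp [hfit], hrc.2⟩
      | false =>
        have hd1 : (decB aw (f'+1) (csub c p.2) st₁).1 = false := by rw [hrc.1, hok]
        have h2 := iht htaw (decB aw (f'+1) (csub c p.2) st₁).2 hrc.2
        simp only [hd1]
        constructor
        · simpa [hfit, hok] using h2.1
        · simpa using h2.2
    · rw [anyDec_cons, if_neg hfit]
      have h2 := iht htaw st₁ hst₁
      constructor
      · simp only [Bool.not_eq_true] at hfit
        simpa [hfit] using h2.1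
      · exact h2.2

theorem decB_eq (aw : List (String × Cnt)) (haw : Haw aw) (f : Nat) :
    ∀ (c : Cnt) (st : StoreB), PosC c → sumv c ≤ (f : Int) → InvB aw st →
    (decB aw (f+1) c st).1 = okP aw (f+1) c ∧ InvB aw (decB aw (f+1) c st).2 := by
  induction f using Nat.strong_induction_on with
  | _ f ih =>
    intro c st hc hf hst
    rw [decB_succ, okP_succ]
    by_cases h0 : sumv c = 0
    · rw [if_pos h0, if_pos h0]
      exact ⟨rfl, hst⟩
    · rw [if_neg h0, if_neg h0]
      have h1 : 1 ≤ sumv c := by have := sumv_nonneg c hc; omega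
      obtain ⟨f', rfl⟩ : ∃ f', f = f' + 1 := by
        cases f with
        | zero => exfalso; simp at hf; omega
        | succ n => exact ⟨n, rfl⟩
      cases hg : st.get? c.items with
      | some v =>
        have hv := hst c.items v hg
        constructor
        · show v = _
          rw [show v = okP aw ((sumv c).toNat + 1) c from hv.2]
          rw [show okP aw ((sumv c).toNat + 1) c = okP aw ((f'+1) + 1) c from
              okP_stable aw haw ((sumv c).toNat) (f'+1) c hc
                (by omega) (by push_cast at hf ⊢; omega)]
          rw [okP_succ, if_neg h0]
        · exact hst
      | none =>
        have hrec : ∀ (c' : Cnt) (st' : StoreB), PosC c' → sumv c' ≤ ((f' : Nat) : Int) →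
            InvB aw st' → (decB aw (f'+1) c' st').1 = okP aw (f'+1) c'
              ∧ InvB aw (decB aw (f'+1) c' st').2 := by
          intro c' st' hc' hf' hst'
          exact ih f' (by omega) c' st' hc' hf' hst'
        have hfold := anyDec_eq aw haw f' c hc (by push_cast at hf ⊢; omega) hrec aw
          (fun _ h => h) st hst
        constructor
        · exact hfold.1
        · apply invB_insert aw _ hfold.2 c hc
          rw [hfold.1]
          rw [show (aw.any (fun p => fits c p.2 && okP aw (f'+1) (csub c p.2)))
                = okP aw ((f'+1)+1) c from (by rw [okP_succ, if_neg h0])]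
          exact (okP_stable aw haw (f'+1) ((sumv c).toNat) c hc
            (by push_cast at hf ⊢; omega) (by omega))

theorem find?_congr_mem {α : Type} (l : List α) (p q : α → Bool)
    (h : ∀ x ∈ l, p x = q x) : l.find? p = l.find? q := by
  induction l with
  | nil => rfl
  | cons a t ih =>
    have ha := h a List.mem_cons_self
    cases hq : q a with
    | true => rw [List.find?_cons_of_pos (by rw [ha, hq]), List.find?_cons_of_pos hq]
    | false =>
      rw [List.find?_cons_of_neg (by simp [ha, hq]), List.find?_cons_of_neg (by simp [hq])]
      exact ih (fun x hx => h x (List.mem_cons_of_mem _ hx))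

theorem findDec_cons (recf : Cnt → StoreB → Bool × StoreB) (c : Cnt) (p : String × Cnt)
    (rest : List (String × Cnt)) (st : StoreB) :
    findDec recf c (p :: rest) st =
      (if fits c p.2 then
        let res := recf (csub c p.2) st
        if res.1 then (some p, res.2) else findDec recf c rest res.2
      else findDec recf c rest st) := rfl

theorem findDec_eq (aw : List (String × Cnt)) (haw : Haw aw) (c : Cnt) (hc : PosC c) :
    ∀ (l : List (String × Cnt)), (∀ p ∈ l, p ∈ aw) →
    ∀ (st : StoreB), InvB aw st →
    (findDec (decB aw ((sumv c).toNat + 1)) c l st).1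
        = l.find? (fun p => fits c p.2 && okP aw ((sumv c).toNat + 1) (csub c p.2))
    ∧ InvB aw (findDec (decB aw ((sumv c).toNat + 1)) c l st).2 := by
  intro l
  induction l with
  | nil => intro _ st h; exact ⟨rfl, h⟩
  | cons p t iht =>
    intro hmem st hst
    have hpaw : p ∈ aw := hmem p List.mem_cons_self
    have htaw : ∀ q ∈ t, q ∈ aw := fun q hq => hmem q (List.mem_cons_of_mem _ hq)
    by_cases hfit : fits c p.2 = true
    · have hpw := haw p hpaw
      have hpos := posC_csub c p.2 hc hpw.1
      have hlt := sumv_csub_lt c p.2 hc hpw.1 hfit hpw.2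
      have hnn := sumv_nonneg c hc
      have hrc := decB_eq aw haw ((sumv c).toNat) (csub c p.2) st hpos (by omega) hst
      rw [findDec_cons, if_pos hfit]
      cases hok : okP aw ((sumv c).toNat + 1) (csub c p.2) with
      | true =>
        have hd1 : (decB aw ((sumv c).toNat + 1) (csub c p.2) st).1 = true := by rw [hrc.1, hok]
        simp only [hd1]
        exact ⟨(List.find?_cons_of_pos (by simp [hfit, hok])).symm, hrc.2⟩
      | false =>
        have hd1 : (decB aw ((sumv c).toNat + 1) (csub c p.2) st).1 = false := by rw [hrc.1, hok]
        have h2 := iht htaw (decB aw ((sumv c).toNat + 1) (csub c p.2) st).2 hrc.2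
        simp only [hd1]
        constructor
        · rw [List.find?_cons_of_neg (by simp [hfit, hok])]
          simpa using h2.1
        · simpa using h2.2
    · rw [findDec_cons, if_neg hfit]
      have h2 := iht htaw st hst
      constructor
      · rw [List.find?_cons_of_neg (by simp [hfit])]
        exact h2.1
      · exact h2.2

theorem greedyB_succ (aw : List (String × Cnt)) (f : Nat) (c : Cnt) (st : StoreB)
    (acc : List String) :
    greedyB aw (f+1) c st acc =
      (if 0 < sumv c then
        let r := findDec (decB aw ((sumv c).toNat + 1)) c aw st
        match r.1 with
        | some p => greedyB aw f (csub c p.2) r.2 (acc ++ [p.1])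
        | none => acc
      else acc) := rfl

theorem gP_succ (aw : List (String × Cnt)) (f : Nat) (c : Cnt) :
    gP aw (f+1) c =
      (if 0 < sumv c then
        match aw.find? (fun p => fits c p.2 && okP aw f (csub c p.2)) with
        | some p => p.1 :: gP aw f (csub c p.2)
        | none => []
      else []) := rfl

theorem greedyB_eq (aw : List (String × Cnt)) (haw : Haw aw) (f : Nat) :
    ∀ (c : Cnt) (st : StoreB) (acc : List String), PosC c → sumv c ≤ (f : Int) → InvB aw st →
    greedyB aw (f+1) c st acc = acc ++ gP aw (f+1) c := by
  induction f using Nat.strong_induction_on with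
  | _ f ih =>
    intro c st acc hc hf hst
    rw [greedyB_succ, gP_succ]
    by_cases hpos : 0 < sumv c
    · rw [if_pos hpos, if_pos hpos]
      obtain ⟨f', rfl⟩ : ∃ f', f = f' + 1 := by
        cases f with
        | zero => exfalso; simp at hf; omega
        | succ n => exact ⟨n, rfl⟩
      have hfind := findDec_eq aw haw c hc aw (fun _ h => h) st hst
      have hcong : aw.find? (fun p => fits c p.2 && okP aw ((sumv c).toNat + 1) (csub c p.2))
          = aw.find? (fun p => fits c p.2 && okP aw (f'+1) (csub c p.2)) := by
        apply find?_congr_mem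
        intro p hp
        by_cases hfit : fits c p.2 = true
        · have hpw := haw p hp
          have hpos2 := posC_csub c p.2 hc hpw.1
          have hlt := sumv_csub_lt c p.2 hc hpw.1 hfit hpw.2
          rw [okP_stable aw haw ((sumv c).toNat) (f') (csub c p.2) hpos2
            (by omega) (by push_cast at hf ⊢; omega)]
        · simp [hfit]
      simp only [hfind.1, hcong]
      cases hres : aw.find? (fun p => fits c p.2 && okP aw (f'+1) (csub c p.2)) with
      | none => simp
      | some p =>
        have hpaw : p ∈ aw := List.mem_of_find?_eq_some hres
        have hpred := List.find?_some hres
        have hfit : fits c p.2 = true := by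
          have := hpred
          simp only [Bool.and_eq_true] at this
          exact this.1
        have hpw := haw p hpaw
        have hpos2 := posC_csub c p.2 hc hpw.1
        have hlt := sumv_csub_lt c p.2 hc hpw.1 hfit hpw.2
        simp only []
        rw [ih f' (by omega) (csub c p.2) _ (acc ++ [p.1]) hpos2
          (by push_cast at hf ⊢; omega) hfind.2]
        simp
    · rw [if_neg hpos, if_neg hpos]
      simp

theorem invB_empty (aw : List (String × Cnt)) : InvB aw PySem.Dict.empty := by
  intro k v hkv
  rw [PySem.Dict.get?_empty] at hkv
  cases hkv

theorem findAnagramB_eq (aw : List (String × Cnt)) (haw : Haw aw) (goal : Cnt) (hg : PosC goal) :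
    findAnagramB goal aw =
      (if okP aw ((sumv goal).toNat + 1) goal
       then some (gP aw ((sumv goal).toNat + 1) goal) else none) := by
  have hnn := sumv_nonneg goal hg
  have hd := decB_eq aw haw ((sumv goal).toNat) goal PySem.Dict.empty hg (by omega)
    (invB_empty aw)
  show (if (decB aw ((sumv goal).toNat + 1) goal PySem.Dict.empty).1 = true then _ else _) = _
  rw [hd.1]
  cases hok : okP aw ((sumv goal).toNat + 1) goal with
  | false => rw [if_neg (by simp), if_neg (by simp)]
  | true =>
    rw [if_pos rfl, if_pos rfl]
    rw [greedyB_eq aw haw ((sumv goal).toNat) goal _ [] hg (by omega) hd.2]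
    simp

-- ~~~ sortedness of the processed dictionary ~~~
theorem beforeB_asymm (a b : String × Cnt) (h : beforeB a b = true) : beforeB b a = false := by
  rw [Bool.eq_false_iff]
  intro hcon
  simp only [beforeB, Bool.or_eq_true, Bool.and_eq_true, Bool.not_eq_eq_eq_not, Bool.not_true,
    decide_eq_true_eq, decide_eq_false_iff_not] at h hcon
  rcases h with h1 | ⟨h1, h2⟩ <;> rcases hcon with g1 | ⟨g1, g2⟩
  · omega
  · omega
  · omega
  · exact absurd (lt_trans h2 g2) (lt_irrefl _)

theorem beforeB_trans (a b c : String × Cnt) (hab : beforeB a b = true) (hbc : beforeB b c = true) :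
    beforeB a c = true := by
  simp only [beforeB, Bool.or_eq_true, Bool.and_eq_true, Bool.not_eq_eq_eq_not, Bool.not_true,
    decide_eq_true_eq, decide_eq_false_iff_not] at hab hbc ⊢
  rcases hab with h1 | ⟨h1, h2⟩
  · rcases hbc with g1 | ⟨g1, g2⟩
    · left; omega
    · left; omega
  · rcases hbc with g1 | ⟨g1, g2⟩
    · left; omega
    · right
      exact ⟨by omega, lt_trans h2 g2⟩

theorem insertBy_pairwise (before : (String × Cnt) → (String × Cnt) → Bool)
    (hasym : ∀ a b, before a b = true → before b a = false)
    (htrans : ∀ a b c, before a b = true → before b c = true → before a c = true)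
    (x : String × Cnt) (l : List (String × Cnt))
    (hl : l.Pairwise (fun a b => before b a = false)) :
    (PySem.List.insertBy before x l).Pairwise (fun a b => before b a = false) := by
  induction l with
  | nil => simp [PySem.List.insertBy]
  | cons y ys ih =>
    show (if before x y = true then x :: y :: ys else y :: PySem.List.insertBy before x ys).Pairwise _
    rcases List.pairwise_cons.mp hl with ⟨hy, hys⟩
    by_cases hxy : before x y = true
    · rw [if_pos hxy]
      apply List.pairwise_cons.mpr
      refine ⟨?_, hl⟩
      intro z hz
      rcases List.mem_cons.mp hz with rfl | hz'
      · exact hasym _ _ hxy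
      · by_contra hzx
        rw [Bool.not_eq_false] at hzx
        have := htrans z x y hzx hxy
        rw [hy z hz'] at this
        cases this
    · rw [if_neg hxy]
      apply List.pairwise_cons.mpr
      constructor
      · intro z hz
        rcases (PySem.List.mem_insertBy before x z ys).mp hz with rfl | hz'
        · exact Bool.not_eq_true _ ▸ (by simpa using hxy)
        · exact hy z hz'
      · exact ih hys

theorem foldl_insertBy_pairwise (before : (String × Cnt) → (String × Cnt) → Bool)
    (hasym : ∀ a b, before a b = true → before b a = false)
    (htrans : ∀ a b c, before a b = true → before b c = true → before a c = true) :
    ∀ (xs acc : List (String × Cnt)), acc.Pairwise (fun a b => before b a = false) →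
    (xs.foldl (fun acc x => PySem.List.insertBy before x acc) acc).Pairwise
      (fun a b => before b a = false) := by
  intro xs
  induction xs with
  | nil => intro acc h; exact h
  | cons x t ih =>
    intro acc h
    exact ih _ (insertBy_pairwise before hasym htrans x acc h)

theorem processDict_sorted (dws : List String) :
    (processDict dws).Pairwise (fun p q => beforeB q p = false) := by
  have : processDict dws
      = (((dws.map cleanUp).filter (fun w => !(w == ""))).map
          (fun w => (w, charCount w))).foldl
          (fun acc x => PySem.List.insertBy beforeB x acc) [] := rfl
  rw [this]
  exact foldl_insertBy_pairwise beforeB beforeB_asymm beforeB_trans _ [] (by simp)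

theorem processDict_mem (dws : List String) (p : String × Cnt) (hp : p ∈ processDict dws) :
    p.2 = charCount p.1 ∧ p.1 ≠ "" := by
  have hperm := PySem.List.sorted2_perm
    (((dws.map cleanUp).filter (fun w => !(w == ""))).map (fun w => (w, charCount w)))
    (fun p : String × Cnt => -(PySem.Str.len p.1)) (fun p : String × Cnt => p.1) false
  have hp' := hperm.mem_iff.mp hp
  rcases List.mem_map.mp hp' with ⟨w, hw, rfl⟩
  rcases List.mem_filter.mp hw with ⟨_, hne⟩
  refine ⟨rfl, ?_⟩
  simpa using hne

-- ~~~ greedy computes A's best ~~~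
theorem cmpL_self (l : List String) : cmpL l l = 0 := by
  induction l with
  | nil => simp [cmpL]
  | cons a t ih => simp [cmpL, ih]

theorem cmpL_pos_of_before_false (p q : String × Cnt) (h : beforeB q p = false)
    (hne : p.1 ≠ q.1) (x y : List String) : 0 < cmpL (q.1 :: x) (p.1 :: y) := by
  simp only [beforeB, Bool.or_eq_false_iff, Bool.and_eq_false_iff, Bool.not_eq_false',
    decide_eq_true_eq, decide_eq_false_iff_not] at h
  obtain ⟨h1, h2⟩ := h
  simp only [cmpL]
  by_cases hlen : PySem.Str.len q.1 = PySem.Str.len p.1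
  · rw [if_neg (by omega)]
    rw [if_pos (fun hqp => hne hqp.symm)]
    have hnlt : ¬(q.1 < p.1) := by
      rcases h2 with h2 | h2
      · omega
      · exact h2
    have hplt : p.1 < q.1 := lt_of_le_of_ne (le_of_not_gt hnlt) hne
    rw [if_pos hplt]
    omega
  · have hqp : PySem.Str.len q.1 < PySem.Str.len p.1 := by omega
    rw [if_pos (by omega)]
    omega

theorem foldl_fix {α β : Type} (g : β → α → β) (b : β) :
    ∀ (l : List α), (∀ q ∈ l, g b q = b) → l.foldl g b = b := by
  intro l
  induction l with
  | nil => intro _; rfl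
  | cons a t ih =>
    intro h
    simp only [List.foldl_cons, h a List.mem_cons_self]
    exact ih (fun q hq => h q (List.mem_cons_of_mem _ hq))

theorem stepP_keep (aw : List (String × Cnt)) (f : Nat) (c : Cnt)
    (p q : String × Cnt) (hq : beforeB q p = false) (heq12 : q.1 = p.1 → q.2 = p.2)
    (rl : List String) (hrl : bestP aw f (csub c p.2) = some rl) :
    stepP (bestP aw f) c (some (p.1 :: rl)) q = some (p.1 :: rl) := by
  unfold stepP
  by_cases hfit : fits c q.2 = true
  · rw [if_pos hfit]
    cases hbq : bestP aw f (csub c q.2) with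
    | none => rfl
    | some rq =>
      by_cases hqp : q.1 = p.1
      · have h2 := heq12 hqp
        rw [h2, hrl] at hbq
        cases hbq
        rw [hqp]
        simp [cmpL_self]
      · have hpos := cmpL_pos_of_before_false p q hq (fun h => hqp h.symm) rq rl
        have hnl : ¬ (cmpL (q.1 :: rq) (p.1 :: rl) < 0) := by omega
        simp [hnl]
  · rw [if_neg hfit]

theorem foldPure_sorted (aw : List (String × Cnt)) (f : Nat) (c : Cnt)
    (hfun2 : ∀ q ∈ aw, ∀ p ∈ aw, q.1 = p.1 → q.2 = p.2) :
    ∀ (l : List (String × Cnt)), (∀ q ∈ l, q ∈ aw) →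
    l.Pairwise (fun a b => beforeB b a = false) →
    l.foldl (stepP (bestP aw f) c) none =
      (match l.find? (fun p => fits c p.2 && (bestP aw f (csub c p.2)).isSome) with
       | some p => some (p.1 :: (bestP aw f (csub c p.2)).getD [])
       | none => none) := by
  intro l
  induction l with
  | nil => intro _ _; rfl
  | cons p t iht =>
    intro hmem hpw
    rcases List.pairwise_cons.mp hpw with ⟨hhead, htail⟩
    simp only [List.foldl_cons]
    by_cases hfit : fits c p.2 = true
    · cases hbp : bestP aw f (csub c p.2) with
      | some rl =>
        rw [List.find?_cons_of_pos (by simp [hfit, hbp])]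
        have hstep : stepP (bestP aw f) c none p = some (p.1 :: rl) := by
          unfold stepP
          rw [if_pos hfit, hbp]
        rw [hstep]
        rw [foldl_fix _ _ t (fun q hq => stepP_keep aw f c p q (hhead q hq)
          (fun h12 => hfun2 q (hmem q (List.mem_cons_of_mem _ hq)) p
            (hmem p List.mem_cons_self) h12) rl hbp)]
        simp [hbp]
      | none =>
        rw [List.find?_cons_of_neg (by simp [hbp])]
        have hstep : stepP (bestP aw f) c none p = none := by
          unfold stepP
          rw [if_pos hfit, hbp]
        rw [hstep]
        exact iht (fun q hq => hmem q (List.mem_cons_of_mem _ hq)) htail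
    · rw [List.find?_cons_of_neg (by simp [hfit])]
      have hstep : stepP (bestP aw f) c none p = none := by
        unfold stepP
        rw [if_neg hfit]
      rw [hstep]
      exact iht (fun q hq => hmem q (List.mem_cons_of_mem _ hq)) htail

theorem bestP_eq_gP (aw : List (String × Cnt)) (haw : Haw aw)
    (hfun : ∀ p ∈ aw, ∀ q ∈ aw, p.1 = q.1 → p.2 = q.2)
    (hsort : aw.Pairwise (fun p q => beforeB q p = false)) (f : Nat) :
    ∀ (c : Cnt), PosC c → sumv c ≤ (f : Int) →
    (bestP aw (f+1) c).isSome = true →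
    bestP aw (f+1) c = some (gP aw (f+1) c) := by
  induction f using Nat.strong_induction_on with
  | _ f ih =>
    intro c hc hf hs
    by_cases h0 : sumv c = 0
    · rw [bestP_succ, if_pos h0, gP_succ, if_neg (by omega)]
    · have h1 : 1 ≤ sumv c := by have := sumv_nonneg c hc; omega
      obtain ⟨f', rfl⟩ : ∃ f', f = f' + 1 := by
        cases f with
        | zero => exfalso; simp at hf; omega
        | succ n => exact ⟨n, rfl⟩
      have hcong : aw.find? (fun p => fits c p.2 && (bestP aw (f'+1) (csub c p.2)).isSome)
          = aw.find? (fun p => fits c p.2 && okP aw (f'+1) (csub c p.2)) := by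
        apply find?_congr_mem
        intro p hp
        by_cases hfit : fits c p.2 = true
        · have hpw := haw p hp
          have hpos2 := posC_csub c p.2 hc hpw.1
          have hlt := sumv_csub_lt c p.2 hc hpw.1 hfit hpw.2
          rw [okP_eq_isSome aw haw f' (csub c p.2) hpos2 (by push_cast at hf ⊢; omega)]
        · simp [hfit]
      rw [bestP_succ, if_neg h0,
        foldPure_sorted aw (f'+1) c hfun aw (fun _ h => h) hsort, hcong] at hs ⊢
      rw [gP_succ, if_pos (by omega)]
      cases hres : aw.find? (fun p => fits c p.2 && okP aw (f'+1) (csub c p.2)) with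
      | none =>
        rw [hres] at hs
        simp at hs
      | some p =>
        rw [hres] at hs
        have hpaw : p ∈ aw := List.mem_of_find?_eq_some hres
        have hpred := List.find?_some hres
        have hok : okP aw (f'+1) (csub c p.2) = true := by
          simp only [Bool.and_eq_true] at hpred
          exact hpred.2
        have hfit : fits c p.2 = true := by
          simp only [Bool.and_eq_true] at hpred
          exact hpred.1
        have hpw := haw p hpaw
        have hpos2 := posC_csub c p.2 hc hpw.1
        have hlt := sumv_csub_lt c p.2 hc hpw.1 hfit hpw.2
        have hiss : (bestP aw (f'+1) (csub c p.2)).isSome = true := by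
          rw [← okP_eq_isSome aw haw f' (csub c p.2) hpos2 (by push_cast at hf ⊢; omega)]
          exact hok
        have hrec := ih f' (by omega) (csub c p.2) hpos2 (by push_cast at hf ⊢; omega) hiss
        simp only []
        rw [hrec]
        simp

theorem processDict_haw (dws : List String) : Haw (processDict dws) := by
  intro p hp
  obtain ⟨h1, h2⟩ := processDict_mem dws p hp
  exact ⟨h1 ▸ posC_charCount p.1, h1 ▸ charCount_items_ne_nil p.1 h2⟩

theorem processDict_hfun (dws : List String) :
    ∀ p ∈ processDict dws, ∀ q ∈ processDict dws, p.1 = q.1 → p.2 = q.2 := by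
  intro p hp q hq h12
  rw [(processDict_mem dws p hp).1, (processDict_mem dws q hq).1, h12]

theorem findAnagram_agree (dws : List String) (g : Cnt) (hg : PosC g) :
    findAnagramA g (processDict dws) = findAnagramB g (processDict dws) := by
  have haw := processDict_haw dws
  have hnn := sumv_nonneg g hg
  rw [findAnagramA_eq _ haw g hg, findAnagramB_eq _ haw g hg]
  by_cases hok : okP (processDict dws) ((sumv g).toNat + 1) g = true
  · rw [if_pos hok]
    rw [okP_eq_isSome _ haw ((sumv g).toNat) g hg (by omega)] at hok
    exact bestP_eq_gP _ haw (processDict_hfun dws) (processDict_sorted dws)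
      ((sumv g).toNat) g hg (by omega) hok
  · rw [if_neg hok]
    rw [okP_eq_isSome _ haw ((sumv g).toNat) g hg (by omega)] at hok
    rw [Option.not_isSome_iff_eq_none] at hok
    exact hok

-- ===== VERDICT (by name: the statement is the Claim_ definition above) =====
theorem FindBestAnagrams_spec : Claim_equal_FindBestAnagrams := by
  intro words dictionaryWords _
  show FindBestAnagrams words dictionaryWords = FindBestAnagrams_alt words dictionaryWords
  unfold FindBestAnagrams FindBestAnagrams_alt
  apply PySem.List.foldl_congr_mem
  intro acc word _
  simp only []
  rw [findAnagram_agree dictionaryWords (charCount (cleanUp word)) (posC_charCount _)]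
  rcases findAnagramB (charCount (cleanUp word)) (processDict dictionaryWords) with _ | (_ | ⟨x, xs⟩) <;> rfl
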